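-- pv_equiv track=rewrite | github.com/nicolasdma/jarre-app | scripts/ingest-youtube.py | deduplicate_consecutive
-- ===== SOURCE A (Python) =====
-- def deduplicate_consecutive(words: list[str], max_repeat: int = 3) -> list[str]:
--     """Remove consecutive repeated words that appear more than max_repeat times.
--
--     Auto-generated captions sometimes stutter: "the the the the solution".
--     """
--     if not words:
--         return words
--
--     result: list[str] = [words[0]]
--     repeat_count = 1
--
--     for i in range(1, len(words)):
--         if words[i].lower() == words[i - 1].lower():
--             repeat_count += 1
--             if repeat_count <= max_repeat:
--                 result.append(words[i])
--         else:
--             repeat_count = 1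
--             result.append(words[i])
--
--     return result
-- ===== SOURCE B (Python) =====
-- from itertools import groupby
--
--
-- def deduplicate_consecutive(words: list[str], max_repeat: int = 3) -> list[str]:
--     """Collapse runs of consecutive case-insensitively equal words to at most
--     max(max_repeat, 1) occurrences (the first word of a run is always kept)."""
--     if not words:
--         return words
--     keep = max(max_repeat, 1)
--     result: list[str] = []
--     for _, group in groupby(words, key=str.lower):
--         result.extend(list(group)[:keep])
--     return result
-- ===== Notes on version B (the rewrite author's own statement) =====
-- stated objective: idiomatic
-- what changed: B splits the word list into runs of consecutive case-insensitively equal words with itertools.groupby and keeps the first max(max_repeat, 1) words of each run, replacing A's per-index loop with a running repeat counter.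
import Mathlib
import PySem

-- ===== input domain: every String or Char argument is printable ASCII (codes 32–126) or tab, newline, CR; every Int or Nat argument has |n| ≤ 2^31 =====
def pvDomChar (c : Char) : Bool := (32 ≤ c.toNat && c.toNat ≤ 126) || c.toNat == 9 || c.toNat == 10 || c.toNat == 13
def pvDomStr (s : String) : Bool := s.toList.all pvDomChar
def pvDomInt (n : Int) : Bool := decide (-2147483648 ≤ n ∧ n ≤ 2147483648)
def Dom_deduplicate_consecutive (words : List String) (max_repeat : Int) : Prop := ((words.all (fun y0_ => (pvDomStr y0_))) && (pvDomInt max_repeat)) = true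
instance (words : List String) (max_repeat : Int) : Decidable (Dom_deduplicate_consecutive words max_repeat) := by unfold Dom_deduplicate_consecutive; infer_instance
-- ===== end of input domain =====

-- B forms the runs of consecutive case-insensitively equal words with itertools.groupby and
-- slices each run, instead of A's per-step repeat counter (objective: idiomatic; same cost).


-- ===== PORT A =====
-- loop state: result, repeat_count; prev is words[i-1]
def dedupGo (max_repeat : Int) (result : List String) (repeat_count : Int) (prev : String) : List String → List String
  | [] => result
  | w :: rest =>
    if PySem.Str.lower w == PySem.Str.lower prev then
      if repeat_count + 1 ≤ max_repeat then
        dedupGo max_repeat (result ++ [w]) (repeat_count + 1) w rest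
      else
        dedupGo max_repeat result (repeat_count + 1) w rest
    else
      dedupGo max_repeat (result ++ [w]) 1 w rest

def deduplicate_consecutive (words : List String) (max_repeat : Int) : List String :=
  match words with
  | [] => words
  | w :: rest => dedupGo max_repeat [w] 1 w rest

-- ===== PORT B =====
-- itertools.groupby(words, key=str.lower): maximal runs of consecutive words with equal lowering;
-- grp holds the current run reversed, cur is the previous element.
def runsGo (grp : List String) (cur : String) : List String → List (List String)
  | [] => [grp.reverse]
  | y :: ys =>
    if PySem.Str.lower y == PySem.Str.lower cur then runsGo (y :: grp) y ys
    else grp.reverse :: runsGo [y] y ys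

def deduplicate_consecutive_alt (words : List String) (max_repeat : Int) : List String :=
  match words with
  | [] => words
  | x :: xs =>
    let keep := max max_repeat 1
    -- list(group)[:keep] with keep ≥ 1, so the slice is List.take
    (runsGo [x] x xs).foldl (fun res g => res ++ g.take keep.toNat) []

-- ===== PRECONDITION & SPEC =====
def Spec_deduplicate_consecutive (words : List String) (max_repeat : Int) (out : List String) : Prop := out = deduplicate_consecutive_alt words max_repeat
instance (words : List String) (max_repeat : Int) (out : List String) : Decidable (Spec_deduplicate_consecutive words max_repeat out) := by unfold Spec_deduplicate_consecutive; infer_instance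

-- ===== CLAIM (what is proved, stated in full; the proofs are below) =====
def Claim_equal_deduplicate_consecutive : Prop := ∀ (words : List String) (max_repeat : Int), Dom_deduplicate_consecutive words max_repeat → Spec_deduplicate_consecutive words max_repeat (deduplicate_consecutive words max_repeat)

-- ===== LEMMAS AND PROOFS =====

-- flatten-with-take: peel the first group off the fold
lemma foldTake_cons (n : Nat) (r : List String) (rs : List (List String)) :
    (r :: rs).foldl (fun r g => r ++ g.take n) [] =
      r.take n ++ rs.foldl (fun r g => r ++ g.take n) [] := by
  simp [List.foldl_cons]

lemma take_pos_cons (K : Nat) (hK : 1 ≤ K) (y : String) (l : List String) :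
    (y :: l).take K = y :: l.take (K - 1) := by
  obtain ⟨j, rfl⟩ : ∃ j, K = j + 1 := ⟨K - 1, by omega⟩
  simp

-- the first run produced by runsGo extends grp.reverse
lemma runsGo_first (rest : List String) (grp : List String) (cur : String) :
    ∃ cont rs, runsGo grp cur rest = (grp.reverse ++ cont) :: rs := by
  induction rest generalizing grp cur with
  | nil => exact ⟨[], [], by simp [runsGo]⟩
  | cons y ys ih =>
    by_cases h : PySem.Str.lower y == PySem.Str.lower cur
    · obtain ⟨cont, rs, hc⟩ := ih (y :: grp) y
      exact ⟨y :: cont, rs, by simp [runsGo, h, hc]⟩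
    · exact ⟨[], runsGo [y] y ys, by simp [runsGo, h]⟩

-- main invariant: grp is the (reversed) current run, repeat_count = grp.length,
-- result already holds min grp.length K kept words of the current run
lemma dedupGo_eq_runs (m : Int) (rest : List String) :
    ∀ (grp : List String) (prev : String) (result : List String), grp ≠ [] →
      dedupGo m result (grp.length : Int) prev rest =
        result ++ ((runsGo grp prev rest).foldl
            (fun r g => r ++ g.take (max m 1).toNat) []).drop (min grp.length (max m 1).toNat) := by
  induction rest with
  | nil =>
    intro grp prev result _
    have hlen : (grp.reverse.take (max m 1).toNat).length = min grp.length (max m 1).toNat := by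
      simp [Nat.min_comm]
    simp [dedupGo, runsGo, List.drop_eq_nil_of_le (le_of_eq hlen)]
  | cons y ys ih =>
    intro grp prev result hne
    set K := (max m 1).toNat with hK
    have hKmax : (1 : Int) ≤ max m 1 := le_max_right _ _
    have hK1 : 1 ≤ K := by omega
    have hg1 : 1 ≤ grp.length := List.length_pos_of_ne_nil hne
    by_cases h : PySem.Str.lower y == PySem.Str.lower prev
    · -- same run continues
      have hrg : runsGo grp prev (y :: ys) = runsGo (y :: grp) y ys := by simp [runsGo, h]
      obtain ⟨cont, rs, hfirst⟩ := runsGo_first ys (y :: grp) y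
      by_cases hm : (grp.length : Int) + 1 ≤ m
      · -- kept: g+1 ≤ K
        have hmm : max m 1 = m := max_eq_left (by omega)
        have hgK : grp.length + 1 ≤ K := by omega
        have hih := ih (y :: grp) y (result ++ [y]) (by simp)
        simp only [List.length_cons, Nat.cast_add, Nat.cast_one] at hih
        rw [show dedupGo m result (grp.length : Int) prev (y :: ys)
              = dedupGo m (result ++ [y]) ((grp.length : Int) + 1) y ys by
            simp [dedupGo, h, hm]]
        rw [hih, hrg, hfirst, foldTake_cons]
        have hsplit : ((y :: grp).reverse ++ cont).take K
            = grp.reverse ++ y :: cont.take (K - grp.length - 1) := by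
          rw [List.reverse_cons, List.append_assoc, List.take_append]
          rw [List.take_of_length_le (by simp; omega)]
          simp only [List.singleton_append]
          rw [take_pos_cons _ (by simp; omega)]
          congr 2
          simp
        rw [hsplit]
        have hmin1 : min (grp.length + 1) K = grp.length + 1 := by omega
        have hmin2 : min grp.length K = grp.length := by omega
        rw [hmin1, hmin2]
        rw [show grp.reverse ++ y :: cont.take (K - grp.length - 1)
              = (grp.reverse ++ [y]) ++ cont.take (K - grp.length - 1) by simp]
        rw [List.append_assoc, List.drop_append, List.drop_append]
        simp
      · -- over budget: K ≤ g, nothing more kept from this run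
        have hgK : K ≤ grp.length := by
          by_cases hm1 : m ≤ 1
          · have : max m 1 = 1 := max_eq_right hm1
            omega
          · have : max m 1 = m := max_eq_left (by omega)
            omega
        have hih := ih (y :: grp) y result (by simp)
        simp only [List.length_cons, Nat.cast_add, Nat.cast_one] at hih
        rw [show dedupGo m result (grp.length : Int) prev (y :: ys)
              = dedupGo m result ((grp.length : Int) + 1) y ys by
            simp [dedupGo, h, hm]]
        rw [hih, hrg]
        rw [show min (grp.length + 1) K = K by omega, show min grp.length K = K by omega]
    · -- new run starts
      have hrg : runsGo grp prev (y :: ys) = grp.reverse :: runsGo [y] y ys := by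
        simp [runsGo, h]
      have hstep : dedupGo m result (grp.length : Int) prev (y :: ys)
          = dedupGo m (result ++ [y]) ((([y] : List String).length : Int)) y ys := by
        simp [dedupGo, h]
      have hih := ih [y] y (result ++ [y]) (by simp)
      obtain ⟨cont, rs, hfirst⟩ := runsGo_first ys [y] y
      rw [hstep, hih, hrg, foldTake_cons, hfirst]
      have hlen : (grp.reverse.take K).length = min grp.length K := by simp [Nat.min_comm]
      rw [List.drop_append, List.drop_eq_nil_of_le (le_of_eq hlen),
          show min grp.length K - (grp.reverse.take K).length = 0 by omega]
      rw [foldTake_cons]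
      have hhead : (([y] : List String).reverse ++ cont).take K = y :: cont.take (K - 1) := by
        simp [take_pos_cons K hK1]
      rw [hhead]
      simp [Nat.min_eq_left hK1]

theorem deduplicate_consecutive_spec_aux (words : List String) (max_repeat : Int) :
    deduplicate_consecutive words max_repeat = deduplicate_consecutive_alt words max_repeat := by
  cases words with
  | nil => rfl
  | cons w rest =>
    set K := (max max_repeat 1).toNat with hK
    have hKmax : (1 : Int) ≤ max max_repeat 1 := le_max_right _ _
    have hK1 : 1 ≤ K := by omega
    have h := dedupGo_eq_runs max_repeat rest [w] w [w] (by simp)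
    rw [← hK] at h
    norm_num at h
    obtain ⟨cont, rs, hfirst⟩ := runsGo_first rest [w] w
    have hhead : (([w] : List String).reverse ++ cont).take K = w :: cont.take (K - 1) := by
      simp [take_pos_cons K hK1]
    show dedupGo max_repeat [w] 1 w rest = _
    rw [h]
    simp only [deduplicate_consecutive_alt]
    rw [← hK, hfirst, foldTake_cons, hhead]
    simp [Nat.min_eq_left hK1, take_pos_cons K hK1]

-- ===== VERDICT (by name: the statement is the Claim_ definition above) =====
theorem deduplicate_consecutive_spec : Claim_equal_deduplicate_consecutive := by
  intro words max_repeat _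
  exact deduplicate_consecutive_spec_aux words max_repeat
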